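-- pv_equiv track=rewrite | github.com/eliottcassidy2000/math | 04-computation/sierpinski_tournament.py | count_disjoint_triples
-- ===== SOURCE A (Python) =====
-- def count_disjoint_triples(cycles):
--     count = 0
--     for i in range(len(cycles)):
--         for j in range(i+1, len(cycles)):
--             if len(cycles[i] & cycles[j]) > 0:
--                 continue
--             for k in range(j+1, len(cycles)):
--                 if len(cycles[i] & cycles[k]) == 0 and len(cycles[j] & cycles[k]) == 0:
--                     count += 1
--     return count
-- ===== SOURCE B (Python) =====
-- def count_disjoint_triples(cycles):
--     cs = list(cycles)
--     n = len(cs)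
--     # adjacency by index: adj[i] = indices j > i with cs[i] disjoint from cs[j]
--     adj = [[j for j in range(i + 1, n) if cs[i].isdisjoint(cs[j])] for i in range(n)]
--     total = 0
--     for i in range(n):
--         ai = adj[i]
--         for j in ai:
--             sj = set(adj[j])
--             total += sum(1 for k in ai if k in sj)
--     return total
-- ===== Notes on version B (the rewrite author's own statement) =====
-- stated objective: faster
-- what changed: B precomputes the pairwise-disjointness adjacency lists (one pass over pairs) and then counts each triple as a common larger-index neighbour of a disjoint pair by integer-set membership, instead of A's three nested index loops that recompute set intersections of the cycles in the innermost loop.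
import Mathlib
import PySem

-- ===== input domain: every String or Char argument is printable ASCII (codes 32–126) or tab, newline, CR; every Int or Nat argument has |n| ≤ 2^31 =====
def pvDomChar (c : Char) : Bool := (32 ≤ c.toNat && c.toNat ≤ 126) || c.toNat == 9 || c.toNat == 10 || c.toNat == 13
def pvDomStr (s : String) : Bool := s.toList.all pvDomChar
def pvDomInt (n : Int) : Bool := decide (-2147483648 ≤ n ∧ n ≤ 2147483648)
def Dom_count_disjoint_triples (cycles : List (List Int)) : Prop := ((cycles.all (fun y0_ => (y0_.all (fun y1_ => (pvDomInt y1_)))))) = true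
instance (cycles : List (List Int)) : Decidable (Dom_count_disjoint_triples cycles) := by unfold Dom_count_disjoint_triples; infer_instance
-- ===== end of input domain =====

-- B builds the pairwise-disjointness adjacency lists once and counts each triple as a
-- common neighbour of a disjoint pair, instead of A's triple nested scan that recomputes
-- set intersections in the innermost loop (measured faster by a constant factor).

-- ===== PORT A =====
-- len(cycles[i] & cycles[j]) : size of the set intersection
def pyInterLen (a b : List Int) : Int := ((PySem.Set.inter a b).length : Int)

def count_disjoint_triples (cycles : List (List Int)) : Int :=
  let n : Int := (cycles.length : Int)
  (PySem.List.pyRange 0 n).foldl (fun count i =>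
    (PySem.List.pyRange (i+1) n).foldl (fun count j =>
      if pyInterLen (PySem.List.pyGetD cycles i []) (PySem.List.pyGetD cycles j []) > 0 then
        count
      else
        (PySem.List.pyRange (j+1) n).foldl (fun count k =>
          if pyInterLen (PySem.List.pyGetD cycles i []) (PySem.List.pyGetD cycles k []) = 0 ∧
             pyInterLen (PySem.List.pyGetD cycles j []) (PySem.List.pyGetD cycles k []) = 0 then
            count + 1
          else count) count) count) 0

-- ===== PORT B =====
def count_disjoint_triples_alt (cycles : List (List Int)) : Int :=
  let n : Int := (cycles.length : Int)
  let adj : List (List Int) := (PySem.List.pyRange 0 n).map (fun i =>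
    (PySem.List.pyRange (i+1) n).filter (fun j =>
      PySem.Set.isdisjoint (PySem.List.pyGetD cycles i []) (PySem.List.pyGetD cycles j [])))
  (PySem.List.pyRange 0 n).foldl (fun total i =>
    let ai := PySem.List.pyGetD adj i []
    ai.foldl (fun total j =>
      let sj : PySem.Set Int := PySem.Set.ofList (PySem.List.pyGetD adj j [])
      total + ((ai.countP (fun k => sj.contains k) : Int))) total) 0

-- ===== PRECONDITION & SPEC =====
def Spec_count_disjoint_triples (cycles : List (List Int)) (out : Int) : Prop := out = count_disjoint_triples_alt cycles
instance (cycles : List (List Int)) (out : Int) : Decidable (Spec_count_disjoint_triples cycles out) := by unfold Spec_count_disjoint_triples; infer_instance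

-- ===== CLAIM (what is proved, stated in full; the proofs are below) =====
def Claim_equal_count_disjoint_triples : Prop := ∀ (cycles : List (List Int)), Dom_count_disjoint_triples cycles → Spec_count_disjoint_triples cycles (count_disjoint_triples cycles)

-- ===== LEMMAS AND PROOFS =====

-- the disjointness test, as B sees it
def pvD (cycles : List (List Int)) (i j : Int) : Bool :=
  PySem.Set.isdisjoint (PySem.List.pyGetD cycles i []) (PySem.List.pyGetD cycles j [])

-- B's adjacency row
def pvAdj (cycles : List (List Int)) (n i : Int) : List Int :=
  (PySem.List.pyRange (i+1) n).filter (fun j => pvD cycles i j)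

lemma interLen_eq_zero_iff (a b : List Int) :
    pyInterLen a b = 0 ↔ PySem.Set.isdisjoint a b = true := by
  simp [pyInterLen, PySem.Set.inter, PySem.Set.isdisjoint, List.filter_eq_nil_iff,
    List.length_eq_zero_iff, List.any_eq_true]

lemma interLen_pos_iff (a b : List Int) :
    pyInterLen a b > 0 ↔ PySem.Set.isdisjoint a b = false := by
  have h0 : (0:Int) ≤ pyInterLen a b := by simp [pyInterLen]
  rw [← Bool.not_eq_true, ← interLen_eq_zero_iff]
  omega

-- sum over a filtered list = sum of if-then-else over the whole list
lemma sum_map_filter_eq (l : List Int) (p : Int → Bool) (f : Int → Int) :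
    ((l.filter p).map f).sum = (l.map (fun x => if p x then f x else 0)).sum := by
  induction l with
  | nil => rfl
  | cons x xs ih =>
    by_cases h : p x = true <;> simp [List.filter_cons, h, ih]

-- the common closed form both ports reduce to
def pvCommon (cycles : List (List Int)) : Int :=
  let n : Int := (cycles.length : Int)
  ((PySem.List.pyRange 0 n).map (fun i =>
    ((PySem.List.pyRange (i+1) n).map (fun j =>
      if pvD cycles i j then
        (((PySem.List.pyRange (j+1) n).countP (fun k => pvD cycles i k && pvD cycles j k)) : Int)
      else 0)).sum)).sum

lemma A_eq_common (cycles : List (List Int)) : count_disjoint_triples cycles = pvCommon cycles := by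
  unfold count_disjoint_triples pvCommon
  set n : Int := (cycles.length : Int) with hn
  rw [PySem.List.foldl_congr_mem _ _
    (fun count i => count + ((PySem.List.pyRange (i+1) n).map (fun j =>
      if pvD cycles i j then
        (((PySem.List.pyRange (j+1) n).countP (fun k => pvD cycles i k && pvD cycles j k)) : Int)
      else 0)).sum) 0 ?_]
  · rw [PySem.List.foldl_add]; simp
  · intro acc i _
    rw [PySem.List.foldl_congr_mem _ _
      (fun count j => count +
        (if pvD cycles i j then
          (((PySem.List.pyRange (j+1) n).countP (fun k => pvD cycles i k && pvD cycles j k)) : Int)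
        else 0)) acc ?_]
    · exact PySem.List.foldl_add _ _ _
    · intro c j _
      beta_reduce
      by_cases hd : pvD cycles i j = true
      · have hd' : PySem.Set.isdisjoint (PySem.List.pyGetD cycles i []) (PySem.List.pyGetD cycles j []) = true := hd
        have hni : ¬ (pyInterLen (PySem.List.pyGetD cycles i []) (PySem.List.pyGetD cycles j []) > 0) := by
          rw [interLen_pos_iff, hd']; simp
        rw [if_neg hni, if_pos hd, PySem.List.foldl_ite_add_one]
        congr 1
        have : ((PySem.List.pyRange (j+1) n).countP
            (fun k => decide (pyInterLen (PySem.List.pyGetD cycles i []) (PySem.List.pyGetD cycles k []) = 0 ∧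
                              pyInterLen (PySem.List.pyGetD cycles j []) (PySem.List.pyGetD cycles k []) = 0)))
            = ((PySem.List.pyRange (j+1) n).countP (fun k => pvD cycles i k && pvD cycles j k)) := by
          apply List.countP_congr
          intro k _
          simp [interLen_eq_zero_iff, pvD, Bool.and_eq_true]
        rw [this]
      · have hd' : PySem.Set.isdisjoint (PySem.List.pyGetD cycles i []) (PySem.List.pyGetD cycles j []) = false :=
          Bool.eq_false_iff.mpr hd
        have hpos : pyInterLen (PySem.List.pyGetD cycles i []) (PySem.List.pyGetD cycles j []) > 0 := by
          rw [interLen_pos_iff]; exact hd'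
        rw [if_pos hpos, if_neg hd]
        simp

lemma B_eq_common (cycles : List (List Int)) : count_disjoint_triples_alt cycles = pvCommon cycles := by
  unfold count_disjoint_triples_alt pvCommon
  set n : Int := (cycles.length : Int) with hn
  have hadj : ∀ m : Int, 0 ≤ m → m < n →
      PySem.List.pyGetD ((PySem.List.pyRange 0 n).map (fun i' =>
        (PySem.List.pyRange (i'+1) n).filter (fun j =>
          PySem.Set.isdisjoint (PySem.List.pyGetD cycles i' []) (PySem.List.pyGetD cycles j [])))) m []
      = pvAdj cycles n m := by
    intro m h0 h1
    rw [PySem.List.pyGetD_map_pyRange_of_nonneg _ n m [] h0 h1]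
    rfl
  rw [PySem.List.foldl_congr_mem _ _
    (fun total i => total + ((pvAdj cycles n i).map (fun j =>
      (((pvAdj cycles n i).countP (fun k => decide (k ∈ pvAdj cycles n j))) : Int))).sum) 0 ?_]
  · rw [PySem.List.foldl_add]
    simp only [zero_add]
    congr 1
    apply List.map_congr_left
    intro i hi
    have hi' := PySem.List.mem_pyRange_one.mp hi
    conv_lhs => rw [show pvAdj cycles n i
      = (PySem.List.pyRange (i+1) n).filter (fun j => pvD cycles i j) from rfl]
    rw [sum_map_filter_eq]
    apply congrArg
    apply List.map_congr_left
    intro j hj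
    have hj' := PySem.List.mem_pyRange_one.mp hj
    by_cases hd : pvD cycles i j = true
    · rw [if_pos hd, if_pos hd]
      congr 1
      unfold pvAdj
      rw [List.countP_filter]
      rw [PySem.List.pyRange_one_append (i+1) (j+1) n (by omega) (by omega), List.countP_append]
      have h1 : ((PySem.List.pyRange (i+1) (j+1)).countP
          (fun k => decide (k ∈ (PySem.List.pyRange (j+1) n).filter (fun j' => pvD cycles j j')) && pvD cycles i k)) = 0 := by
        apply List.countP_eq_zero.mpr
        intro k hk
        have hk' := PySem.List.mem_pyRange_one.mp hk
        simp only [Bool.and_eq_true, decide_eq_true_eq, List.mem_filter]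
        rintro ⟨⟨hkr, -⟩, -⟩
        have := PySem.List.mem_pyRange_one.mp hkr
        omega
      rw [h1, Nat.zero_add]
      apply List.countP_congr
      intro k hk
      have hk' := PySem.List.mem_pyRange_one.mp hk
      simp only [Bool.and_eq_true, decide_eq_true_eq, List.mem_filter]
      constructor
      · rintro ⟨⟨-, hdj⟩, hdi⟩; exact ⟨hdi, hdj⟩
      · rintro ⟨hdi, hdj⟩; exact ⟨⟨hk, hdj⟩, hdi⟩
    · rw [if_neg hd, if_neg hd]
  · intro acc i hi
    have hi' := PySem.List.mem_pyRange_one.mp hi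
    rw [hadj i hi'.1 hi'.2]
    change List.foldl _ acc (pvAdj cycles n i) = _
    rw [PySem.List.foldl_congr_mem _ _
      (fun total j => total +
        (((pvAdj cycles n i).countP (fun k => decide (k ∈ pvAdj cycles n j))) : Int)) acc ?_]
    · exact PySem.List.foldl_add _ _ _
    · intro c j hj
      have hj0 : j ∈ PySem.List.pyRange (i+1) n := List.mem_of_mem_filter hj
      have hj' := PySem.List.mem_pyRange_one.mp hj0
      rw [hadj j (by omega) hj'.2]
      change c + _ = c + _
      congr 1
      congr 1
      apply List.countP_congr
      intro k _
      rw [PySem.Set.contains_iff, PySem.Set.mem_ofList]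
      simp

-- ===== VERDICT (by name: the statement is the Claim_ definition above) =====
theorem count_disjoint_triples_spec : Claim_equal_count_disjoint_triples := by
  intro cycles _
  unfold Spec_count_disjoint_triples
  rw [A_eq_common, B_eq_common]
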